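-- pv_equiv track=rewrite | github.com/Mahesh552001/LeetCode | Algorithms/Pick From Both Sides.py | solve
-- ===== SOURCE A (Python) =====
-- def solve(A, B):
--     s=0
--     for i in range(B):
--         s+=A[i]
--     maximum=s
--     i=B-1
--     j=len(A)-1
--     while(i>=0):
--         s-=A[i]
--         s+=A[j]
--         if s>maximum:
--             maximum=s
--         i-=1
--         j-=1
--     return maximum
-- ===== SOURCE B (Python) =====
-- def solve(A, B):
--     n = len(A)
--     prefix = [0]
--     for k in range(B):
--         prefix.append(prefix[-1] + A[k])
--     suffix = [0]
--     for m in range(B):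
--         suffix.append(suffix[-1] + A[n - 1 - m])
--     best = prefix[0] + suffix[B]
--     for k in range(1, B + 1):
--         cand = prefix[k] + suffix[B - k]
--         if cand > best:
--             best = cand
--     return best
-- ===== Notes on version B (the rewrite author's own statement) =====
-- stated objective: alternative
-- what changed: Replaces A's running-window update (running sum adjusted by subtracting a left element and adding a right element while tracking the max) with precomputed prefix-sum and suffix-sum arrays plus a separate loop taking max over prefix[k]+suffix[B-k].
-- outside the precondition, e.g. on solve([1, 2], -2): A returns 0, B raises IndexError
import Mathlib
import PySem

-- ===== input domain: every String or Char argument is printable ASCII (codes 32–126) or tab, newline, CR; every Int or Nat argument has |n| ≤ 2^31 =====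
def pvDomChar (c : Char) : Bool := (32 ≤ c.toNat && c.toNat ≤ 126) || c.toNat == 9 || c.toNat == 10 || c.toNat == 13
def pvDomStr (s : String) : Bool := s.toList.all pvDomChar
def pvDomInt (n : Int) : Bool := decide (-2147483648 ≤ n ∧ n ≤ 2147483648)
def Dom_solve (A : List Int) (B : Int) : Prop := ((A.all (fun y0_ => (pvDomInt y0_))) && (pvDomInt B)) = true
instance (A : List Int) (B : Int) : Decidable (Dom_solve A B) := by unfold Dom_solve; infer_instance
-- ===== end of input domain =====

-- B replaces A's running-window update with precomputed prefix/suffix sum arrays and a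
-- separate max loop over prefix[k]+suffix[B-k] (alternative decomposition, same cost).

-- ===== PORT A =====
def solve (A : List Int) (B : Int) : Int :=
  let s0 : Int := (PySem.List.pyRange 0 B 1).foldl (fun s i => s + PySem.List.pyGetD A i 0) 0
  let r := (PySem.List.pyRange (B - 1) (-1) (-1)).foldl
    (fun (st : Int × Int × Int) i =>
      let s' := st.1 - PySem.List.pyGetD A i 0 + PySem.List.pyGetD A st.2.1 0
      (s', st.2.1 - 1, if s' > st.2.2 then s' else st.2.2))
    (s0, ((A.length : Int) - 1, s0))
  r.2.2

-- ===== PORT B =====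
def solve_alt (A : List Int) (B : Int) : Int :=
  let n : Int := A.length
  let pfx := (PySem.List.pyRange 0 B 1).foldl
    (fun p k => p ++ [PySem.List.pyGetD p (-1) 0 + PySem.List.pyGetD A k 0]) [(0 : Int)]
  let sfx := (PySem.List.pyRange 0 B 1).foldl
    (fun p m => p ++ [PySem.List.pyGetD p (-1) 0 + PySem.List.pyGetD A (n - 1 - m) 0]) [(0 : Int)]
  let best := PySem.List.pyGetD pfx 0 0 + PySem.List.pyGetD sfx B 0
  (PySem.List.pyRange 1 (B + 1) 1).foldl
    (fun best k =>
      let cand := PySem.List.pyGetD pfx k 0 + PySem.List.pyGetD sfx (B - k) 0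
      if cand > best then cand else best) best

-- ===== PRECONDITION & SPEC =====
-- Pre_ excludes B > len(A), where both programs raise IndexError, and B ≤ -2 — a negative
-- pick count outside the task's natural domain, where B's suffix[B] lookup raises IndexError
-- (A returns 0 there); B = -1, where both return 0, stays inside.
def Pre_solve (A : List Int) (B : Int) : Prop := -1 ≤ B ∧ B ≤ A.length
instance (A : List Int) (B : Int) : Decidable (Pre_solve A B) := by unfold Pre_solve; infer_instance
def pvWitness_solve : List Int × Int := ([1, -2, 3, 4], 2)

def Spec_solve (A : List Int) (B : Int) (out : Int) : Prop := out = solve_alt A B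
instance (A : List Int) (B : Int) (out : Int) : Decidable (Spec_solve A B out) := by unfold Spec_solve; infer_instance

-- ===== CLAIM (what is proved, stated in full; the proofs are below) =====
def Claim_equal_solve : Prop := ∀ (A : List Int) (B : Int), Dom_solve A B → Pre_solve A B → Spec_solve A B (solve A B)

-- ===== LEMMAS AND PROOFS =====
-- sum of the first k elements / of the last m elements
def pref (A : List Int) (k : Nat) : Int := (A.take k).sum
def suf (A : List Int) (m : Nat) : Int := (A.drop (A.length - m)).sum
-- the candidate value: k elements from the left, b-k from the right
def fval (A : List Int) (b k : Nat) : Int := pref A k + suf A (b - k)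
-- running maximum of f over 0..k
def maxUpTo (f : Nat → Int) : Nat → Int
  | 0 => f 0
  | k + 1 => max (maxUpTo f k) (f (k + 1))

lemma suf_zero (A : List Int) : suf A 0 = 0 := by
  simp [suf]

lemma pref_succ (A : List Int) (k : Nat) (h : k < A.length) :
    pref A (k + 1) = pref A k + A.getD k 0 := by
  unfold pref
  rw [List.take_add_one, List.sum_append, List.getElem?_eq_getElem h]
  simp [List.getD, List.getElem?_eq_getElem h]

lemma suf_succ (A : List Int) (m : Nat) (h : m < A.length) :
    suf A (m + 1) = suf A m + A.getD (A.length - (m + 1)) 0 := by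
  have hj : A.length - (m + 1) < A.length := by omega
  have hd : A.drop (A.length - (m + 1)) = A[A.length - (m + 1)] :: A.drop (A.length - (m + 1) + 1) :=
    List.drop_eq_getElem_cons hj
  have hm : A.length - (m + 1) + 1 = A.length - m := by omega
  simp [suf, hd, hm, List.getD, List.getElem?_eq_getElem hj]
  ring

lemma f0_le_maxUpTo (f : Nat → Int) (b : Nat) : f 0 ≤ maxUpTo f b := by
  induction b with
  | zero => simp [maxUpTo]
  | succ k ih => simp only [maxUpTo]; omega

lemma fval_step (A : List Int) (b i : Nat) (hb : b ≤ A.length) (hi : i < b) :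
    fval A b (i + 1) - A.getD i 0 + A.getD (A.length - b + i) 0 = fval A b i := by
  have h1 := pref_succ A i (by omega)
  have h2 := suf_succ A (b - i - 1) (by omega)
  have e1 : b - i - 1 + 1 = b - i := by omega
  rw [e1] at h2
  have e2 : A.length - (b - i) = A.length - b + i := by omega
  rw [e2] at h2
  have e3 : b - (i + 1) = b - i - 1 := by omega
  unfold fval
  rw [e3, h1, h2]
  ring

-- invariant of A's while loop, counting i down with j = len - (b - i)
lemma loopA (A : List Int) (b : Nat) (hb : b ≤ A.length) :
    ∀ (i : Nat), i < b → ∀ (mx : Int),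
      ((PySem.List.pyRange (i : Int) (-1) (-1)).foldl
        (fun (st : Int × Int × Int) x =>
          let s' := st.1 - PySem.List.pyGetD A x 0 + PySem.List.pyGetD A st.2.1 0
          (s', st.2.1 - 1, if s' > st.2.2 then s' else st.2.2))
        (fval A b (i + 1), ((A.length : Int) - ((b : Int) - (i : Int)), mx))).2.2
      = max mx (maxUpTo (fval A b) i) := by
  intro i
  induction i with
  | zero =>
    intro h0 mx
    rw [show ((0:Nat):Int) = 0 by norm_num,
        PySem.List.pyRange_neg_one_cons (by norm_num : (-1:Int) < 0),
        show (0:Int) - 1 = -1 by norm_num,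
        PySem.List.pyRange_neg_one_eq_nil (le_refl _)]
    have hidx : (A.length : Int) - ((b : Int) - (0:Int)) = ((A.length - b + 0 : Nat) : Int) := by omega
    simp only [List.foldl_cons, List.foldl_nil, hidx, PySem.List.pyGetD_natCast]
    have hstep := fval_step A b 0 hb h0
    have h00 : PySem.List.pyGetD A 0 0 = A.getD 0 0 := by
      simpa using PySem.List.pyGetD_natCast A 0 0
    simp only [h00, maxUpTo]
    omega
  | succ k ih =>
    intro hk mx
    rw [PySem.List.pyRange_neg_one_cons (by omega : (-1:Int) < ((k+1 : Nat) : Int))]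
    have hidx : (A.length : Int) - ((b : Int) - ((k+1 : Nat):Int)) = ((A.length - b + (k+1) : Nat) : Int) := by omega
    simp only [List.foldl_cons, hidx, PySem.List.pyGetD_natCast]
    have hstep := fval_step A b (k+1) hb hk
    rw [show fval A b (k + 1 + 1) - A.getD (k+1) 0 + A.getD (A.length - b + (k+1)) 0 = fval A b (k+1) from hstep]
    have e4 : ((A.length - b + (k+1) : Nat) : Int) - 1 = (A.length : Int) - ((b : Int) - ((k:Nat):Int)) := by omega
    have e5 : ((k+1 : Nat):Int) - 1 = ((k : Nat) : Int) := by omega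
    rw [e4, e5, ih (by omega)]
    simp only [maxUpTo]
    omega

lemma sum_range_getD (A : List Int) (b : Nat) (hb : b ≤ A.length) :
    (List.range b).foldl (fun s k => s + A.getD k 0) 0 = pref A b := by
  induction b with
  | zero => simp [pref]
  | succ k ih =>
      rw [List.range_succ, List.foldl_append, ih (by omega), pref_succ A k (by omega)]
      simp

lemma s0_eq (A : List Int) (b : Nat) (hb : b ≤ A.length) :
    (PySem.List.pyRange 0 (b : Int) 1).foldl (fun s i => s + PySem.List.pyGetD A i 0) 0
    = pref A b := by
  rw [PySem.List.pyRange_zero_nat, List.foldl_map]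
  simp only [PySem.List.pyGetD_natCast]
  exact sum_range_getD A b hb

-- B's prefix list is [pref 0, …, pref b]
lemma prefix_build (A : List Int) (b : Nat) (hb : b ≤ A.length) :
    (PySem.List.pyRange 0 (b : Int) 1).foldl
      (fun p k => p ++ [PySem.List.pyGetD p (-1) 0 + PySem.List.pyGetD A k 0]) [(0 : Int)]
    = (List.range (b + 1)).map (pref A) := by
  induction b with
  | zero =>
    simp [PySem.List.pyRange_one_eq_nil (le_refl (0:Int)), pref]
  | succ c ih =>
    have hc : ((c + 1 : Nat) : Int) = (c : Int) + 1 := by push_cast; ring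
    rw [hc, PySem.List.pyRange_one_succ_right (by positivity), List.foldl_append,
        ih (by omega), List.foldl_cons, List.foldl_nil]
    rw [show (List.range (c+1)).map (pref A) = (List.range c).map (pref A) ++ [pref A c] by
          rw [List.range_succ, List.map_append]; rfl]
    rw [PySem.List.pyGetD_neg_one_append_singleton, PySem.List.pyGetD_natCast,
        ← pref_succ A c (by omega)]
    simp [List.range_succ]

-- B's suffix list is [suf 0, …, suf b]
lemma suffix_build (A : List Int) (b : Nat) (hb : b ≤ A.length) :
    (PySem.List.pyRange 0 (b : Int) 1).foldl
      (fun p m => p ++ [PySem.List.pyGetD p (-1) 0 +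
        PySem.List.pyGetD A ((A.length : Int) - 1 - m) 0]) [(0 : Int)]
    = (List.range (b + 1)).map (suf A) := by
  induction b with
  | zero =>
    simp [PySem.List.pyRange_one_eq_nil (le_refl (0:Int)), suf]
  | succ c ih =>
    have hc : ((c + 1 : Nat) : Int) = (c : Int) + 1 := by push_cast; ring
    rw [hc, PySem.List.pyRange_one_succ_right (by positivity), List.foldl_append,
        ih (by omega), List.foldl_cons, List.foldl_nil]
    rw [show (List.range (c+1)).map (suf A) = (List.range c).map (suf A) ++ [suf A c] by
          rw [List.range_succ, List.map_append]; rfl]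
    have hidx : (A.length : Int) - 1 - (c : Int) = ((A.length - (c + 1) : Nat) : Int) := by omega
    rw [PySem.List.pyGetD_neg_one_append_singleton, hidx, PySem.List.pyGetD_natCast,
        ← suf_succ A c (by omega)]
    simp [List.range_succ]

-- invariant of B's max loop, counting k up
lemma loopB (f : Nat → Int) (b : Nat) (g : Int → Int)
    (hg : ∀ k : Nat, k ≤ b → g (k : Int) = f k) :
    ∀ (d j : Nat), j ≤ b → b - j = d → ∀ (mx : Int),
      (PySem.List.pyRange ((j : Int) + 1) ((b : Int) + 1) 1).foldl
        (fun best x => if g x > best then g x else best) (max mx (maxUpTo f j))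
      = max mx (maxUpTo f b) := by
  intro d
  induction d with
  | zero =>
    intro j hj hd mx
    have : j = b := by omega
    subst this
    rw [PySem.List.pyRange_one_eq_nil (le_refl _), List.foldl_nil]
  | succ e ih =>
    intro j hj hd mx
    rw [PySem.List.pyRange_one_cons (by omega : (j : Int) + 1 < (b : Int) + 1), List.foldl_cons]
    have h1 : ((j : Int) + 1) = ((j + 1 : Nat) : Int) := by omega
    have h2 : (if g ((j:Int)+1) > max mx (maxUpTo f j) then g ((j:Int)+1) else max mx (maxUpTo f j))
        = max mx (maxUpTo f (j+1)) := by
      rw [h1, hg (j+1) (by omega)]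
      simp only [maxUpTo]
      omega
    rw [h2, show (j:Int) + 1 + 1 = ((j+1 : Nat) : Int) + 1 by omega, ih (j+1) (by omega) (by omega)]

lemma solve_eq_maxUpTo (A : List Int) (b : Nat) (hb : b ≤ A.length) :
    solve A (b : Int) = maxUpTo (fval A b) b := by
  simp only [solve]
  rw [s0_eq A b hb]
  cases b with
  | zero =>
    rw [show ((0:Nat):Int) - 1 = -1 by norm_num,
        PySem.List.pyRange_neg_one_eq_nil (le_refl _), List.foldl_nil]
    simp [maxUpTo, fval, pref, suf]
  | succ c =>
    have hfv : fval A (c+1) (c+1) = pref A (c+1) := by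
      simp [fval, suf_zero]
    rw [show ((c+1 : Nat) : Int) - 1 = ((c : Nat) : Int) by omega,
        show (A.length : Int) - 1 = (A.length : Int) - (((c+1 : Nat) : Int) - ((c : Nat) : Int)) by omega,
        show pref A (c+1) = fval A (c+1) (c+1) from hfv.symm,
        loopA A (c+1) hb c (by omega)]
    simp only [maxUpTo]
    rw [hfv]
    omega

lemma solve_alt_eq_maxUpTo (A : List Int) (b : Nat) (hb : b ≤ A.length) :
    solve_alt A (b : Int) = maxUpTo (fval A b) b := by
  simp only [solve_alt]
  rw [prefix_build A b hb, suffix_build A b hb]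
  have hbest : PySem.List.pyGetD ((List.range (b+1)).map (pref A)) 0 0 +
      PySem.List.pyGetD ((List.range (b+1)).map (suf A)) ((b:Nat):Int) 0 = fval A b 0 := by
    rw [PySem.List.pyGetD_zero, PySem.List.pyGetD_natCast,
        PySem.List.getD_map_range (pref A) (b+1) 0 0 (by omega),
        PySem.List.getD_map_range (suf A) (b+1) b 0 (by omega)]
    simp [fval]
  rw [hbest]
  have hg : ∀ k : Nat, k ≤ b →
      (fun x : Int => PySem.List.pyGetD ((List.range (b+1)).map (pref A)) x 0 +
        PySem.List.pyGetD ((List.range (b+1)).map (suf A)) (((b:Nat):Int) - x) 0) ((k:Nat):Int)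
      = fval A b k := by
    intro k hk
    simp only
    rw [PySem.List.pyGetD_natCast, PySem.List.getD_map_range (pref A) (b+1) k 0 (by omega),
        show ((b:Nat):Int) - ((k:Nat):Int) = ((b - k : Nat) : Int) by omega,
        PySem.List.pyGetD_natCast, PySem.List.getD_map_range (suf A) (b+1) (b-k) 0 (by omega)]
    rfl
  have h := loopB (fval A b) b
    (fun x : Int => PySem.List.pyGetD ((List.range (b+1)).map (pref A)) x 0 +
      PySem.List.pyGetD ((List.range (b+1)).map (suf A)) (((b:Nat):Int) - x) 0)
    hg b 0 (by omega) (by omega) (fval A b 0)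
  simp only [Nat.cast_zero, zero_add] at h
  rw [show fval A b 0 = max (fval A b 0) (maxUpTo (fval A b) 0) by simp [maxUpTo], h]
  exact max_eq_right (f0_le_maxUpTo (fval A b) b)

-- ===== VERDICT (by name: the statement is the Claim_ definition above) =====
theorem solve_spec : Claim_equal_solve := by
  intro A B _ hpre
  obtain ⟨h0, hle⟩ := hpre
  unfold Spec_solve
  rcases (by omega : B = -1 ∨ 0 ≤ B) with rfl | h0'
  · simp only [solve, solve_alt,
      PySem.List.pyRange_one_eq_nil (by norm_num : (-1:Int) ≤ 0),
      show (-1:Int) - 1 = -2 by norm_num,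
      PySem.List.pyRange_neg_one_eq_nil (by norm_num : (-2:Int) ≤ -1),
      show (-1:Int) + 1 = 0 by norm_num,
      PySem.List.pyRange_one_eq_nil (by norm_num : (0:Int) ≤ 1),
      List.foldl_nil]
    decide
  · obtain ⟨b, rfl⟩ : ∃ b : Nat, B = (b : Int) := ⟨B.toNat, (Int.toNat_of_nonneg h0').symm⟩
    have hb : b ≤ A.length := by exact_mod_cast hle
    rw [solve_eq_maxUpTo A b hb, solve_alt_eq_maxUpTo A b hb]
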